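-- pv_equiv track=rewrite | github.com/Neha081091/release-automation-poc | refresh_handler.py | _text_pos_to_doc_index
-- ===== SOURCE A (Python) =====
-- def _text_pos_to_doc_index(text_pos: int, segments: list) -> int:
--     """Convert a text position to a document index."""
--     current_pos = 0
--     for text, doc_start, doc_end in segments:
--         if current_pos + len(text) > text_pos:
--             offset = text_pos - current_pos
--             return doc_start + offset
--         current_pos += len(text)
--     return segments[-1][2] if segments else 1
-- ===== SOURCE B (Python) =====
-- def _text_pos_to_doc_index(text_pos: int, segments: list) -> int:
--     """Convert a text position to a document index (prefix sums + binary search)."""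
--     if not segments:
--         return 1
--     ends = []
--     total = 0
--     for seg in segments:
--         total += len(seg[0])
--         ends.append(total)
--     # first index i with ends[i] > text_pos (= bisect_right, hand-rolled: no imports)
--     lo, hi = 0, len(ends)
--     while lo < hi:
--         mid = (lo + hi) // 2
--         if ends[mid] <= text_pos:
--             lo = mid + 1
--         else:
--             hi = mid
--     if lo == len(segments):
--         return segments[-1][2]
--     start = ends[lo - 1] if lo > 0 else 0
--     return segments[lo][1] + (text_pos - start)
-- ===== Notes on version B (the rewrite author's own statement) =====
-- stated objective: alternative
-- what changed: Replaced A's single fused scan (running current_pos with an early return) by a two-phase decomposition: build a prefix-sum list of cumulative text lengths, then locate the target segment with a hand-rolled bisect_right binary search over it.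
import Mathlib
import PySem

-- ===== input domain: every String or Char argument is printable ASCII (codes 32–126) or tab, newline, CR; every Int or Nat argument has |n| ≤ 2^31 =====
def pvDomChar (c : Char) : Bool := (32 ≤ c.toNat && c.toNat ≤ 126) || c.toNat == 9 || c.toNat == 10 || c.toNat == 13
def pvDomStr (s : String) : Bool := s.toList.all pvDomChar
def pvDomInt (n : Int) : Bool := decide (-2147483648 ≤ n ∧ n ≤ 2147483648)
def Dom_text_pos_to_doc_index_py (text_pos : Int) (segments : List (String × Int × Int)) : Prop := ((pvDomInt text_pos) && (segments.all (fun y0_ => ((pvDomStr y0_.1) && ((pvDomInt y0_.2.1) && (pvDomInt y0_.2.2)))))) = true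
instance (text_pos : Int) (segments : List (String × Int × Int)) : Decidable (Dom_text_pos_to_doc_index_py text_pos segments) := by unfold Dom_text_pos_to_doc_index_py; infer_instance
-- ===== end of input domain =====

-- B replaces A's single fused scan by a prefix-sum list of cumulative text lengths plus a
-- hand-rolled bisect_right binary search (objective: alternative decomposition; same O(n) total
-- cost, dominated by building the prefix sums).

-- ===== PORT A =====
-- the for-loop with early return: state is current_pos; none = loop fell through
def tpGoA (text_pos : Int) : List (String × Int × Int) → Int → Option Int
  | [], _ => none
  | (text, doc_start, _) :: rest, cur =>
    if cur + PySem.Str.len text > text_pos then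
      some (doc_start + (text_pos - cur))
    else
      tpGoA text_pos rest (cur + PySem.Str.len text)

def text_pos_to_doc_index_py (text_pos : Int) (segments : List (String × Int × Int)) : Int :=
  match tpGoA text_pos segments 0 with
  | some v => v
  | none =>
    -- 'segments[-1][2] if segments else 1'
    match PySem.List.pyGet? segments (-1) with
    | some s => s.2.2
    | none => 1

-- ===== PORT B =====
-- prefix sums of the text lengths (Source B's first loop; total accumulates)
def bEnds : List (String × Int × Int) → Int → List Int
  | [], _ => []
  | seg :: rest, total =>
    let total' := total + PySem.Str.len seg.1
    total' :: bEnds rest total'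

-- Source B's hand-written while-loop: first index in [lo,hi) whose entry exceeds tp
def bSearch (ends : List Int) (tp : Int) (lo hi : Nat) : Nat :=
  if lo < hi then
    if ends.getD ((lo + hi) / 2) 0 ≤ tp then bSearch ends tp ((lo + hi) / 2 + 1) hi
    else bSearch ends tp lo ((lo + hi) / 2)
  else lo
termination_by hi - lo
decreasing_by all_goals omega

def text_pos_to_doc_index_py_alt (text_pos : Int) (segments : List (String × Int × Int)) : Int :=
  match segments with
  | [] => 1
  | s :: ss =>
    let ends := bEnds (s :: ss) 0
    let lo := bSearch ends text_pos 0 ends.length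
    if lo = (s :: ss).length then ((s :: ss).getLast (by simp)).2.2
    else
      let start := if lo > 0 then ends.getD (lo - 1) 0 else 0
      ((s :: ss).getD lo s).2.1 + (text_pos - start)

-- ===== PRECONDITION & SPEC =====
def Spec_text_pos_to_doc_index_py (text_pos : Int) (segments : List (String × Int × Int)) (out : Int) : Prop := out = text_pos_to_doc_index_py_alt text_pos segments
instance (text_pos : Int) (segments : List (String × Int × Int)) (out : Int) : Decidable (Spec_text_pos_to_doc_index_py text_pos segments out) := by unfold Spec_text_pos_to_doc_index_py; infer_instance

-- ===== CLAIM (what is proved, stated in full; the proofs are below) =====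
def Claim_equal_text_pos_to_doc_index_py : Prop := ∀ (text_pos : Int) (segments : List (String × Int × Int)), Dom_text_pos_to_doc_index_py text_pos segments → Spec_text_pos_to_doc_index_py text_pos segments (text_pos_to_doc_index_py text_pos segments)

-- ===== LEMMAS AND PROOFS =====

-- reference linear index: first position whose entry exceeds tp (length if none)
def linIdx (tp : Int) : List Int → Nat
  | [] => 0
  | e :: es => if e ≤ tp then linIdx tp es + 1 else 0

theorem linIdx_le (tp : Int) (es : List Int) : linIdx tp es ≤ es.length := by
  induction es with
  | nil => simp [linIdx]
  | cons e es ih => simp only [linIdx, List.length_cons]; split <;> omega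

theorem linIdx_lt_of_lt (tp : Int) (es : List Int) (i : Nat) (hi : i < linIdx tp es) :
    es.getD i 0 ≤ tp := by
  induction es generalizing i with
  | nil => simp [linIdx] at hi
  | cons e es ih =>
    simp only [linIdx] at hi
    split at hi
    · cases i with
      | zero => simpa using ‹e ≤ tp›
      | succ j => simpa using ih j (by omega)
    · omega

theorem linIdx_gt (tp : Int) (es : List Int) (h : linIdx tp es < es.length) :
    tp < es.getD (linIdx tp es) 0 := by
  induction es with
  | nil => simp [linIdx] at h
  | cons e es ih =>
    simp only [linIdx] at *
    split
    · rename_i he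
      simp only [he, if_pos] at h
      simpa using ih (by simpa using h)
    · simpa using by omega

theorem bEnds_length (segs : List (String × Int × Int)) (cur : Int) :
    (bEnds segs cur).length = segs.length := by
  induction segs generalizing cur with
  | nil => rfl
  | cons s ss ih => simp [bEnds, ih]

theorem str_len_nonneg (s : String) : 0 ≤ PySem.Str.len s := by
  simp [PySem.Str.len_eq]

theorem bEnds_ge (segs : List (String × Int × Int)) (cur : Int) (x : Int)
    (hx : x ∈ bEnds segs cur) : cur ≤ x := by
  induction segs generalizing cur with
  | nil => simp [bEnds] at hx
  | cons s ss ih =>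
    simp only [bEnds, List.mem_cons] at hx
    have h0 := str_len_nonneg s.1
    rcases hx with h | h
    · omega
    · have := ih (cur + PySem.Str.len s.1) h; omega

theorem bEnds_pairwise (segs : List (String × Int × Int)) (cur : Int) :
    (bEnds segs cur).Pairwise (· ≤ ·) := by
  induction segs generalizing cur with
  | nil => simp [bEnds]
  | cons s ss ih =>
    simp only [bEnds, List.pairwise_cons]
    exact ⟨fun x hx => bEnds_ge _ _ _ hx, ih _⟩

theorem pairwise_getD_mono (es : List Int) (hp : es.Pairwise (· ≤ ·))
    (i k : Nat) (hik : i ≤ k) (hk : k < es.length) : es.getD i 0 ≤ es.getD k 0 := by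
  rcases Nat.lt_or_ge i k with h | h
  · have hi : i < es.length := by omega
    rw [List.getD_eq_getElem es 0 hi, List.getD_eq_getElem es 0 hk]
    exact List.pairwise_iff_getElem.mp hp i k hi hk h
  · have : i = k := by omega
    subst this; rfl

theorem linIdx_eq_of_bracket (ends : List Int) (tp : Int) (lo : Nat)
    (hlo : lo ≤ ends.length)
    (hlow : ∀ i, i < lo → ends.getD i 0 ≤ tp)
    (hhigh : ∀ i, lo ≤ i → i < ends.length → tp < ends.getD i 0) :
    linIdx tp ends = lo := by
  have hle := linIdx_le tp ends
  rcases Nat.lt_trichotomy lo (linIdx tp ends) with h | h | h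
  · exfalso
    have h1 := hhigh lo (by omega) (by omega)
    have h2 := linIdx_lt_of_lt tp ends lo h
    omega
  · omega
  · exfalso
    have h1 := linIdx_gt tp ends (by omega)
    have h2 := hlow (linIdx tp ends) h
    omega

theorem bSearch_eq_linIdx (ends : List Int) (tp : Int)
    (hp : ends.Pairwise (· ≤ ·)) :
    ∀ n lo hi, hi - lo ≤ n → lo ≤ hi → hi ≤ ends.length →
    (∀ i, i < lo → ends.getD i 0 ≤ tp) →
    (∀ i, hi ≤ i → i < ends.length → tp < ends.getD i 0) →
    bSearch ends tp lo hi = linIdx tp ends := by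
  intro n
  induction n with
  | zero =>
    intro lo hi hn hloh hhil hlow hhigh
    have heq : lo = hi := by omega
    rw [bSearch, if_neg (by omega)]
    subst heq
    exact (linIdx_eq_of_bracket ends tp lo (by omega) hlow hhigh).symm
  | succ n ih =>
    intro lo hi hn hloh hhil hlow hhigh
    by_cases hlt : lo < hi
    · rw [bSearch, if_pos hlt]
      split_ifs with hle
      · exact ih ((lo + hi) / 2 + 1) hi (by omega) (by omega) hhil
          (fun i hi2 => by
            rcases Nat.lt_or_ge i lo with h | h
            · exact hlow i h
            · exact le_trans
                (pairwise_getD_mono ends hp i ((lo + hi) / 2) (by omega) (by omega)) hle)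
          hhigh
      · exact ih lo ((lo + hi) / 2) (by omega) (by omega) (by omega) hlow
          (fun i hmi hil => by
            rcases Nat.lt_or_ge i hi with h | h
            · exact lt_of_lt_of_le (by omega : tp < ends.getD ((lo + hi) / 2) 0)
                (pairwise_getD_mono ends hp ((lo + hi) / 2) i hmi hil)
            · exact hhigh i h hil)
    · rw [bSearch, if_neg hlt]
      have heq : lo = hi := by omega
      subst heq
      exact (linIdx_eq_of_bracket ends tp lo (by omega) hlow hhigh).symm

-- the start-of-segment prefix A maintains as current_pos, read off the prefix sums
def prefAt (ends : List Int) (cur : Int) (j : Nat) : Int :=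
  if j = 0 then cur else ends.getD (j - 1) 0

theorem tpGoA_eq_none (tp : Int) (segs : List (String × Int × Int)) (cur : Int)
    (h : linIdx tp (bEnds segs cur) = segs.length) : tpGoA tp segs cur = none := by
  induction segs generalizing cur with
  | nil => rfl
  | cons s ss ih =>
    obtain ⟨text, doc_start, doc_end⟩ := s
    simp only [bEnds, linIdx, List.length_cons] at h
    split at h
    · rename_i hle
      rw [tpGoA, if_neg (by omega)]
      exact ih _ (by omega)
    · omega

theorem tpGoA_eq_some (tp : Int) (segs : List (String × Int × Int)) (cur : Int)
    (d : String × Int × Int)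
    (h : linIdx tp (bEnds segs cur) < segs.length) :
    tpGoA tp segs cur =
      some ((segs.getD (linIdx tp (bEnds segs cur)) d).2.1 +
        (tp - prefAt (bEnds segs cur) cur (linIdx tp (bEnds segs cur)))) := by
  induction segs generalizing cur with
  | nil => simp at h
  | cons s ss ih =>
    obtain ⟨text, doc_start, doc_end⟩ := s
    by_cases hle : cur + PySem.Str.len text ≤ tp
    · have h' : linIdx tp (bEnds ss (cur + PySem.Str.len text)) < ss.length := by
        simp only [bEnds, linIdx, if_pos hle, List.length_cons] at h
        omega
      rw [tpGoA, if_neg (by omega), ih _ h']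
      simp only [bEnds, linIdx, if_pos hle, List.getD_cons_succ]
      congr 2
      cases hk : linIdx tp (bEnds ss (cur + PySem.Str.len text)) with
      | zero => simp [prefAt]
      | succ k => simp [prefAt]
    · rw [tpGoA, if_pos (by omega)]
      simp only [bEnds, linIdx, if_neg hle]
      simp [prefAt]

-- ===== VERDICT (by name: the statement is the Claim_ definition above) =====
theorem text_pos_to_doc_index_py_spec : Claim_equal_text_pos_to_doc_index_py := by
  intro tp segs _
  unfold Spec_text_pos_to_doc_index_py
  cases segs with
  | nil => rfl
  | cons s ss =>
    have hlen : (bEnds (s :: ss) 0).length = (s :: ss).length := bEnds_length _ _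
    have hbs : bSearch (bEnds (s :: ss) 0) tp 0 (bEnds (s :: ss) 0).length
        = linIdx tp (bEnds (s :: ss) 0) :=
      bSearch_eq_linIdx _ tp (bEnds_pairwise _ _) (bEnds (s :: ss) 0).length 0 _
        (by omega) (by omega) (le_refl _) (fun i hi => by omega) (fun i h1 h2 => by omega)
    simp only [text_pos_to_doc_index_py_alt, hbs]
    rcases Nat.lt_or_ge (linIdx tp (bEnds (s :: ss) 0)) (s :: ss).length with hlt | hge
    · unfold text_pos_to_doc_index_py
      rw [tpGoA_eq_some tp (s :: ss) 0 s hlt, if_neg (by omega)]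
      by_cases h0 : linIdx tp (bEnds (s :: ss) 0) = 0
      · simp [prefAt, h0]
      · simp [prefAt, h0, Nat.pos_of_ne_zero h0]
    · have hje : linIdx tp (bEnds (s :: ss) 0) = (s :: ss).length := by
        have := linIdx_le tp (bEnds (s :: ss) 0); omega
      unfold text_pos_to_doc_index_py
      rw [tpGoA_eq_none tp (s :: ss) 0 hje, hje, if_pos rfl,
        PySem.List.pyGet?_neg_one, List.getLast?_eq_some_getLast]
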